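-- pv_equiv track=rewrite | github.com/JAPEREZ-L001/Computer-Science-Hub-Web | .cursor/skills/docs-governor/scripts/check_doc_validation.py | normalize_architecture_content
-- ===== SOURCE A (Python) =====
-- from typing import Dict, Iterable, List, Sequence, Tuple
--
-- def normalize_architecture_content(markdown_text: str) -> str:
--     """
--     Normalize architecture markdown by ignoring volatile timestamp/baseline fields,
--     so we can detect meaningful architecture changes.
--     """
--     lines = markdown_text.splitlines()
--     normalized: List[str] = []
--
--     in_frontmatter = False
--     frontmatter_started = False
--
--     for line in lines:
--         stripped = line.strip()
--
--         if not frontmatter_started and stripped == "---":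
--             frontmatter_started = True
--             in_frontmatter = True
--             normalized.append(line)
--             continue
--
--         if in_frontmatter and stripped == "---":
--             in_frontmatter = False
--             normalized.append(line)
--             continue
--
--         if in_frontmatter and (
--             stripped.startswith("baseline_commit:")
--             or stripped.startswith("last_reviewed:")
--         ):
--             continue
--
--         if stripped.startswith("- generated_at: `"):
--             continue
--
--         normalized.append(line)
--
--     return "\n".join(normalized).rstrip() + "\n"
-- ===== SOURCE B (Python) =====
-- def normalize_architecture_content(markdown_text: str) -> str:
--     """
--     Normalize architecture markdown by ignoring volatile timestamp/baseline fields.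
--     Two-pass: locate the frontmatter delimiters first, then filter by position.
--     """
--     lines = markdown_text.splitlines()
--
--     open_idx = None
--     for i, line in enumerate(lines):
--         if line.strip() == "---":
--             open_idx = i
--             break
--
--     close_idx = None
--     if open_idx is not None:
--         for i in range(open_idx + 1, len(lines)):
--             if lines[i].strip() == "---":
--                 close_idx = i
--                 break
--
--     out = []
--     for i, line in enumerate(lines):
--         stripped = line.strip()
--         in_fm = (
--             open_idx is not None
--             and open_idx < i
--             and (close_idx is None or i < close_idx)
--         )
--         if in_fm and (
--             stripped.startswith("baseline_commit:")
--             or stripped.startswith("last_reviewed:")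
--         ):
--             continue
--         if stripped.startswith("- generated_at: `"):
--             continue
--         out.append(line)
--
--     return "\n".join(out).rstrip() + "\n"
-- ===== Notes on version B (the rewrite author's own statement) =====
-- stated objective: alternative
-- what changed: Replaces the carried in_frontmatter/frontmatter_started state flags with a two-pass scheme: first locate the opening and closing '---' delimiter indices, then filter lines by their position relative to those precomputed boundaries.
import Mathlib
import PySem

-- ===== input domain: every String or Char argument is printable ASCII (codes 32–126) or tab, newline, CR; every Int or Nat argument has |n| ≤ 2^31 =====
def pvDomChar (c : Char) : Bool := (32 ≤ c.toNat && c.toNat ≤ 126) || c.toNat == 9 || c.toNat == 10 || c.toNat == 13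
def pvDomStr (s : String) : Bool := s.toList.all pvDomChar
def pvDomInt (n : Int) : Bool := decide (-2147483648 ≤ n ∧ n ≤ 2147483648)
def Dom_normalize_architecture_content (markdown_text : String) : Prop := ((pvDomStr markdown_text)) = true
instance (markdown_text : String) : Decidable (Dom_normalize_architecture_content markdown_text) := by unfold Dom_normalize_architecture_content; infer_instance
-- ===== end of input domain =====

-- B replaces A's carried frontmatter state flags by precomputed delimiter indices
-- driving a position-based filter (objective: alternative decomposition, same cost).

-- ===== PORT A =====
-- A's loop over the lines, carrying (frontmatter_started, in_frontmatter).
def pvALoop : List String → Bool → Bool → List String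
  | [], _, _ => []
  | l :: rest, fs, inf =>
    if !fs && (PySem.Str.strip l == "---") then
      l :: pvALoop rest true true
    else if inf && (PySem.Str.strip l == "---") then
      l :: pvALoop rest fs false
    else if inf && (PySem.Str.startswith (PySem.Str.strip l) "baseline_commit:"
                    || PySem.Str.startswith (PySem.Str.strip l) "last_reviewed:") then
      pvALoop rest fs inf
    else if PySem.Str.startswith (PySem.Str.strip l) "- generated_at: `" then
      pvALoop rest fs inf
    else
      l :: pvALoop rest fs inf

def normalize_architecture_content (markdown_text : String) : String :=
  let lines := PySem.Str.splitlines markdown_text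
  let normalized := pvALoop lines false false
  PySem.Str.rstrip (PySem.Str.join "\n" normalized) ++ "\n"

-- ===== PORT B =====
-- First index (counting from the given start position) whose strip is "---".
def pvFindDelim : List String → Nat → Option Nat
  | [], _ => none
  | l :: rest, i =>
    if PySem.Str.strip l == "---" then some i else pvFindDelim rest (i + 1)

-- B's region test: position i lies strictly inside the frontmatter range.
def pvInFm (openIdx closeIdx : Option Nat) (i : Nat) : Bool :=
  match openIdx with
  | none => false
  | some o =>
    decide (o < i) &&
      (match closeIdx with
       | none => true
       | some c => decide (i < c))

-- Position-based filter: drop volatile fields inside the frontmatter region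
-- and generated_at lines anywhere; keep everything else.
def pvBFilter (openIdx closeIdx : Option Nat) : List String → Nat → List String
  | [], _ => []
  | l :: rest, i =>
    if pvInFm openIdx closeIdx i
        && (PySem.Str.startswith (PySem.Str.strip l) "baseline_commit:"
            || PySem.Str.startswith (PySem.Str.strip l) "last_reviewed:") then
      pvBFilter openIdx closeIdx rest (i + 1)
    else if PySem.Str.startswith (PySem.Str.strip l) "- generated_at: `" then
      pvBFilter openIdx closeIdx rest (i + 1)
    else
      l :: pvBFilter openIdx closeIdx rest (i + 1)

def normalize_architecture_content_alt (markdown_text : String) : String :=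
  let lines := PySem.Str.splitlines markdown_text
  let openIdx := pvFindDelim lines 0
  let closeIdx :=
    match openIdx with
    | none => none
    | some o => pvFindDelim (lines.drop (o + 1)) (o + 1)
  let out := pvBFilter openIdx closeIdx lines 0
  PySem.Str.rstrip (PySem.Str.join "\n" out) ++ "\n"

-- ===== PRECONDITION & SPEC =====
def Spec_normalize_architecture_content (markdown_text : String) (out : String) : Prop := out = normalize_architecture_content_alt markdown_text
instance (markdown_text : String) (out : String) : Decidable (Spec_normalize_architecture_content markdown_text out) := by unfold Spec_normalize_architecture_content; infer_instance

-- ===== CLAIM (what is proved, stated in full; the proofs are below) =====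
def Claim_equal_normalize_architecture_content : Prop := ∀ (markdown_text : String), Dom_normalize_architecture_content markdown_text → Spec_normalize_architecture_content markdown_text (normalize_architecture_content markdown_text)

-- ===== LEMMAS AND PROOFS =====

theorem pvFindDelim_ge {s : List String} {i o : Nat} (h : pvFindDelim s i = some o) :
    i ≤ o := by
  induction s generalizing i with
  | nil => simp [pvFindDelim] at h
  | cons l rest ih =>
    simp only [pvFindDelim] at h
    split at h
    · injection h with h; omega
    · have := ih h; omega

theorem pvDelim_not_gen : PySem.Str.startswith "---" "- generated_at: `" = false := by decide

-- After the frontmatter closed: A carries (true, false) and only the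
-- generated_at filter applies; B's region test is false because close < i.
theorem pvAfter (rest : List String) (o c : Nat) :
    ∀ i, c < i → pvALoop rest true false = pvBFilter (some o) (some c) rest i := by
  induction rest with
  | nil => intro i _; rfl
  | cons l rs ih =>
    intro i hi
    have hfm : pvInFm (some o) (some c) i = false := by
      simp [pvInFm]; omega
    simp only [pvALoop, pvBFilter, hfm, Bool.not_true, Bool.false_and, Bool.false_eq_true,
      if_false]
    split
    · exact ih (i + 1) (by omega)
    · exact congrArg (l :: ·) (ih (i + 1) (by omega))

-- Inside the frontmatter: A carries (true, true); B's close is the next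
-- delimiter at or after the current position i, and o < i.
theorem pvIn (rest : List String) (o : Nat) :
    ∀ i, o < i → pvALoop rest true true = pvBFilter (some o) (pvFindDelim rest i) rest i := by
  induction rest with
  | nil => intro i _; rfl
  | cons l rs ih =>
    intro i hi
    cases hdel : (PySem.Str.strip l == "---") with
    | true =>
      have hstr : PySem.Str.strip l = "---" := by simpa using hdel
      have hg : PySem.Str.startswith (PySem.Str.strip l) "- generated_at: `" = false := by
        rw [hstr]; exact pvDelim_not_gen
      have hfm : pvInFm (some o) (some i) i = false := by simp [pvInFm]
      simp only [pvALoop, pvBFilter, pvFindDelim, hdel, if_true, Bool.not_true,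
        Bool.false_and, Bool.false_eq_true, if_false, Bool.true_and, Bool.and_self,
        hfm, hg]
      exact congrArg (l :: ·) (pvAfter rs o i (i + 1) (by omega))
    | false =>
      have hfm : pvInFm (some o) (pvFindDelim rs (i + 1)) i = true := by
        unfold pvInFm
        have ho : decide (o < i) = true := by simpa using hi
        cases hc : pvFindDelim rs (i + 1) with
        | none => simp [ho]
        | some c =>
          have := pvFindDelim_ge hc
          simp [ho]; omega
      simp only [pvALoop, pvBFilter, pvFindDelim, hdel, Bool.not_true, Bool.and_false,
        Bool.false_and, Bool.false_eq_true, if_false, Bool.true_and, hfm]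
      split
      · exact ih (i + 1) (by omega)
      · split
        · exact ih (i + 1) (by omega)
        · exact congrArg (l :: ·) (ih (i + 1) (by omega))

-- Before the frontmatter (initial state): B's open is the next delimiter at or
-- after position i, and its close is the delimiter after that.
theorem pvBefore (s : List String) :
    ∀ i, pvALoop s false false =
      pvBFilter (pvFindDelim s i)
        (match pvFindDelim s i with
         | none => none
         | some o => pvFindDelim (s.drop (o + 1 - i)) (o + 1)) s i := by
  induction s with
  | nil => intro i; rfl
  | cons l rs ih =>
    intro i
    cases hdel : (PySem.Str.strip l == "---") with
    | true =>
      -- the first delimiter: open here, recurse inside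
      have hstr : PySem.Str.strip l = "---" := by simpa using hdel
      have hg : PySem.Str.startswith (PySem.Str.strip l) "- generated_at: `" = false := by
        rw [hstr]; exact pvDelim_not_gen
      have hfd : pvFindDelim (l :: rs) i = some i := by simp [pvFindDelim, hdel]
      have hdrop : (l :: rs).drop (i + 1 - i) = rs := by
        have h1 : i + 1 - i = 1 := by omega
        simp [h1]
      have hfm : ∀ cI, pvInFm (some i) cI i = false := by
        intro cI; unfold pvInFm; simp
      rw [hfd]
      simp only [hdrop]
      simp only [pvALoop, pvBFilter, hdel, Bool.not_false, Bool.true_and, if_true,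
        hfm, Bool.false_and, Bool.false_eq_true, if_false, hg]
      exact congrArg (l :: ·) (pvIn rs i (i + 1) (by omega))
    | false =>
      have hfd : pvFindDelim (l :: rs) i = pvFindDelim rs (i + 1) := by
        simp [pvFindDelim, hdel]
      rw [hfd]
      have hclose : (match (pvFindDelim rs (i + 1) : Option Nat) with
          | none => (none : Option Nat)
          | some o => pvFindDelim ((l :: rs).drop (o + 1 - i)) (o + 1)) =
          (match (pvFindDelim rs (i + 1) : Option Nat) with
          | none => (none : Option Nat)
          | some o => pvFindDelim (rs.drop (o + 1 - (i + 1))) (o + 1)) := by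
        cases hc : pvFindDelim rs (i + 1) with
        | none => rfl
        | some o =>
          have hge := pvFindDelim_ge hc
          have h1 : o + 1 - i = (o + 1 - (i + 1)) + 1 := by omega
          simp [h1]
      rw [hclose]
      have hfm : ∀ cI, pvInFm (pvFindDelim rs (i + 1)) cI i = false := by
        intro cI; unfold pvInFm
        cases hc : pvFindDelim rs (i + 1) with
        | none => rfl
        | some o =>
          have := pvFindDelim_ge hc
          have ho : decide (o < i) = false := by simp; omega
          simp [ho]
      simp only [pvALoop, pvBFilter, hdel, Bool.not_false, Bool.and_false,
        Bool.false_and, Bool.false_eq_true, if_false, hfm]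
      split
      · exact ih (i + 1)
      · exact congrArg (l :: ·) (ih (i + 1))

-- ===== VERDICT (by name: the statement is the Claim_ definition above) =====
theorem normalize_architecture_content_spec : Claim_equal_normalize_architecture_content := by
  intro markdown_text _
  have h0 := pvBefore (PySem.Str.splitlines markdown_text) 0
  simp only [Nat.sub_zero] at h0
  show PySem.Str.rstrip (PySem.Str.join "\n"
      (pvALoop (PySem.Str.splitlines markdown_text) false false)) ++ "\n" =
    PySem.Str.rstrip (PySem.Str.join "\n"
      (pvBFilter (pvFindDelim (PySem.Str.splitlines markdown_text) 0)
        (match pvFindDelim (PySem.Str.splitlines markdown_text) 0 with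
         | none => none
         | some o => pvFindDelim ((PySem.Str.splitlines markdown_text).drop (o + 1)) (o + 1))
        (PySem.Str.splitlines markdown_text) 0)) ++ "\n"
  rw [h0]
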